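-- pv_equiv track=rewrite | github.com/robbierao123/stock-zone-alert | test_5_min.py | get_distinct_days
-- ===== SOURCE A (Python) =====
-- from collections import defaultdict
--
-- def get_distinct_days(bars):
--     groups = defaultdict(list)
--
--     for bar in bars:
--         dt = bar.get("date", "")
--         if " " not in dt:
--             continue
--         day = dt.split(" ")[0]
--         groups[day].append(bar)
--
--     return sorted(groups.keys())
-- ===== SOURCE B (Python) =====
-- def get_distinct_days(bars):
--     days = []
--     for bar in bars:
--         dt = bar.get("date", "")
--         if " " in dt:
--             days.append(dt.split(" ")[0])
--     days.sort()
--     out = []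
--     prev = None
--     for d in days:
--         if d != prev:
--             out.append(d)
--             prev = d
--     return out
-- ===== Notes on version B (the rewrite author's own statement) =====
-- stated objective: alternative
-- what changed: Replaces the defaultdict grouping (hash-dedup of days, bars accumulated per key, then sort of the keys) by a flat one-pass collection of day strings followed by sort and a single adjacency-dedup scan.
import Mathlib
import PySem

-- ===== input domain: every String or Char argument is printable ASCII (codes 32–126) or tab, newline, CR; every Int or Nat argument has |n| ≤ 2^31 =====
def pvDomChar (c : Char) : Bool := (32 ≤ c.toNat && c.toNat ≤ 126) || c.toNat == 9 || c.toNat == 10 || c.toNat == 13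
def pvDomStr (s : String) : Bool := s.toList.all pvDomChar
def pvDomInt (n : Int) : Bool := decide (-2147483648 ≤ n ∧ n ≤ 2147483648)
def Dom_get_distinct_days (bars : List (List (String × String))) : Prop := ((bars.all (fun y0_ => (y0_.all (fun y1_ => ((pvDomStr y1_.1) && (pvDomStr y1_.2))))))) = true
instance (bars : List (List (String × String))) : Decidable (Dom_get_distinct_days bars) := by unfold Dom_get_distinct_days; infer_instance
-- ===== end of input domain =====

-- B replaces A's defaultdict grouping (which accumulates the bars per day and sorts the key set)
-- by a flat list of day strings, sorted once and deduplicated by a single adjacency scan — an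
-- alternative algorithm of the same cost.

-- ===== PORT A =====
-- dt.split(" ") with a non-empty separator is always `some` of a non-empty list, so its [0] is its head.
def get_distinct_days (bars : List (List (String × String))) : List String :=
  let groups := bars.foldl (fun groups bar =>
    let dt := (PySem.Dict.mk bar).getD "date" ""
    if PySem.Str.isIn " " dt = false then groups
    else
      let day := ((PySem.Str.split? dt " ").getD []).headD ""
      groups.modify day [] (· ++ [bar])) PySem.Dict.empty
  PySem.List.sorted groups.keys (fun k => k)

-- ===== PORT B =====
def get_distinct_days_alt (bars : List (List (String × String))) : List String :=
  let days := bars.foldl (fun days bar =>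
    let dt := (PySem.Dict.mk bar).getD "date" ""
    if PySem.Str.isIn " " dt then days ++ [((PySem.Str.split? dt " ").getD []).headD ""]
    else days) []
  let sortedDays := PySem.List.sorted days (fun d => d)
  -- out = []; prev = None; for d in sortedDays: if d != prev: out.append(d); prev = d
  let res := sortedDays.foldl (fun (acc : List String × Option String) d =>
    if some d ≠ acc.2 then (acc.1 ++ [d], some d) else acc) ([], none)
  res.1

-- ===== PRECONDITION & SPEC =====
def Spec_get_distinct_days (bars : List (List (String × String))) (out : List String) : Prop := out = get_distinct_days_alt bars
instance (bars : List (List (String × String))) (out : List String) : Decidable (Spec_get_distinct_days bars out) := by unfold Spec_get_distinct_days; infer_instance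

-- ===== CLAIM (what is proved, stated in full; the proofs are below) =====
def Claim_equal_get_distinct_days : Prop := ∀ (bars : List (List (String × String))), Dom_get_distinct_days bars → Spec_get_distinct_days bars (get_distinct_days bars)

-- ===== LEMMAS AND PROOFS =====

-- the filter/projection both loops share: keep a bar iff its date contains a space; its day string
def pvP (bar : List (String × String)) : Bool := PySem.Str.isIn " " ((PySem.Dict.mk bar).getD "date" "")
def pvF (bar : List (String × String)) : String := ((PySem.Str.split? ((PySem.Dict.mk bar).getD "date" "") " ").getD []).headD ""
def pvDays (bars : List (List (String × String))) : List String := (bars.filter pvP).map pvF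

theorem pvDays_cons (bar : List (String × String)) (rest : List (List (String × String))) :
    pvDays (bar :: rest) = if pvP bar then pvF bar :: pvDays rest else pvDays rest := by
  simp only [pvDays, List.filter_cons]
  split_ifs <;> simp

theorem pvUpdate_nil (xs : List String) : PySem.Set.update ([] : List String) xs = PySem.Set.ofList xs := by
  rw [PySem.Set.ofList_eq_foldl]; rfl

theorem pvKeys_insert_add (d : PySem.Dict String (List (List (String × String)))) (k : String)
    (v : List (List (String × String))) :
    (d.insert k v).keys = PySem.Set.add d.keys k := by
  by_cases h : d.contains k = true
  · rw [PySem.Dict.keys_insert_of_contains _ _ h]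
    have hk : k ∈ d.keys := (PySem.Dict.contains_iff_mem_keys d k).mp h
    simp [PySem.Set.add, PySem.Set.contains, hk]
  · rw [PySem.Dict.keys_insert_of_not_contains _ _ (by simpa using h)]
    have hk : k ∉ d.keys := fun hm => h ((PySem.Dict.contains_iff_mem_keys d k).mpr hm)
    simp [PySem.Set.add, PySem.Set.contains, hk]

theorem pvKeysA : ∀ (l : List (List (String × String))) (d : PySem.Dict String (List (List (String × String)))),
    (l.foldl (fun groups bar =>
      let dt := (PySem.Dict.mk bar).getD "date" ""
      if PySem.Str.isIn " " dt = false then groups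
      else
        let day := ((PySem.Str.split? dt " ").getD []).headD ""
        groups.modify day [] (· ++ [bar])) d).keys
      = PySem.Set.update d.keys (pvDays l) := by
  intro l
  induction l with
  | nil => intro d; simp [pvDays, PySem.Set.update]
  | cons bar rest ih =>
    intro d
    rw [List.foldl_cons, ih, pvDays_cons]
    by_cases h : pvP bar = true
    · have h' : PySem.Chars.isIn [' '] (((PySem.Dict.mk bar).getD "date" "").toList) = true := by
        simpa [pvP] using h
      simp [h, h', pvF, pvKeys_insert_add]
    · have hb : pvP bar = false := by simpa using h
      have h' : PySem.Chars.isIn [' '] (((PySem.Dict.mk bar).getD "date" "").toList) = false := by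
        simpa [pvP] using hb
      simp [hb, h']

theorem pvDaysB : ∀ (l : List (List (String × String))) (acc : List String),
    (l.foldl (fun days bar =>
      let dt := (PySem.Dict.mk bar).getD "date" ""
      if PySem.Str.isIn " " dt then days ++ [((PySem.Str.split? dt " ").getD []).headD ""]
      else days) acc)
      = acc ++ pvDays l := by
  intro l
  induction l with
  | nil => intro acc; simp [pvDays]
  | cons bar rest ih =>
    intro acc
    rw [List.foldl_cons, ih, pvDays_cons]
    by_cases h : pvP bar = true
    · have h' : PySem.Chars.isIn [' '] (((PySem.Dict.mk bar).getD "date" "").toList) = true := by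
        simpa [pvP] using h
      simp [h, h', pvF]
    · have hb : pvP bar = false := by simpa using h
      have h' : PySem.Chars.isIn [' '] (((PySem.Dict.mk bar).getD "date" "").toList) = false := by
        simpa [pvP] using hb
      simp [hb, h']

-- the adjacency-dedup scan of B's second loop, as a structural recursion
def pvScan : Option String → List String → List String
  | _, [] => []
  | prev, d :: rest => if some d ≠ prev then d :: pvScan (some d) rest else pvScan prev rest

theorem pvScanFoldl : ∀ (s out : List String) (prev : Option String),
    (s.foldl (fun (acc : List String × Option String) d =>
      if some d ≠ acc.2 then (acc.1 ++ [d], some d) else acc) (out, prev)).1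
      = out ++ pvScan prev s := by
  intro s
  induction s with
  | nil => intro out prev; simp [pvScan]
  | cons d rest ih =>
    intro out prev
    rw [List.foldl_cons]
    by_cases h : some d ≠ prev
    · simp only [pvScan]
      rw [ih]; simp [h]
    · simp only [pvScan, h, ite_false]
      rw [ih]

theorem pvScan_some : ∀ (s : List String) (p : String), s.Pairwise (· ≤ ·) → (∀ y ∈ s, p ≤ y) →
    (pvScan (some p) s).Pairwise (· < ·) ∧ ∀ x, x ∈ pvScan (some p) s ↔ x ∈ s ∧ p < x := by
  intro s
  induction s with
  | nil => intro p _ _; simp [pvScan]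
  | cons d rest ih =>
    intro p hs hp
    have hd : ∀ y ∈ rest, d ≤ y := (List.pairwise_cons.mp hs).1
    have hrest := (List.pairwise_cons.mp hs).2
    by_cases hpd : p = d
    · subst hpd
      have : pvScan (some p) (p :: rest) = pvScan (some p) rest := by simp [pvScan]
      rw [this]
      obtain ⟨pw, hmem⟩ := ih p hrest hd
      refine ⟨pw, fun x => ?_⟩
      rw [hmem x]
      constructor
      · rintro ⟨hx, hpx⟩; exact ⟨List.mem_cons_of_mem _ hx, hpx⟩
      · rintro ⟨hx, hpx⟩
        rcases List.mem_cons.mp hx with h1 | h1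
        · exact absurd hpx (by simp [h1])
        · exact ⟨h1, hpx⟩
    · have hpd' : p < d := lt_of_le_of_ne (hp d (List.mem_cons_self)) (hpd)
      have hne : some d ≠ some p := by
        simpa using fun h : d = p => hpd h.symm
      have : pvScan (some p) (d :: rest) = d :: pvScan (some d) rest := by
        simp only [pvScan]; rw [if_pos hne]
      rw [this]
      obtain ⟨pw, hmem⟩ := ih d hrest hd
      constructor
      · exact List.pairwise_cons.mpr ⟨fun x hx => ((hmem x).mp hx).2, pw⟩
      · intro x
        rw [List.mem_cons, hmem x]
        constructor
        · rintro (h1 | ⟨h1, h2⟩)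
          · exact ⟨by simp [h1], h1 ▸ hpd'⟩
          · exact ⟨List.mem_cons_of_mem _ h1, lt_trans hpd' h2⟩
        · rintro ⟨hx, hpx⟩
          rcases List.mem_cons.mp hx with h1 | h1
          · exact Or.inl h1
          · rcases lt_or_eq_of_le (hd x h1) with h2 | h2
            · exact Or.inr ⟨h1, h2⟩
            · exact Or.inl h2.symm

theorem pvScan_none (s : List String) (hs : s.Pairwise (· ≤ ·)) :
    (pvScan none s).Pairwise (· < ·) ∧ ∀ x, x ∈ pvScan none s ↔ x ∈ s := by
  cases s with
  | nil => simp [pvScan]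
  | cons d rest =>
    have hd : ∀ y ∈ rest, d ≤ y := (List.pairwise_cons.mp hs).1
    have hrest := (List.pairwise_cons.mp hs).2
    have : pvScan none (d :: rest) = d :: pvScan (some d) rest := by simp [pvScan]
    rw [this]
    obtain ⟨pw, hmem⟩ := pvScan_some rest d hrest hd
    constructor
    · exact List.pairwise_cons.mpr ⟨fun x hx => ((hmem x).mp hx).2, pw⟩
    · intro x
      rw [List.mem_cons, hmem x, List.mem_cons]
      constructor
      · rintro (h1 | ⟨h1, _⟩)
        · exact Or.inl h1
        · exact Or.inr h1
      · rintro (h1 | h1)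
        · exact Or.inl h1
        · rcases lt_or_eq_of_le (hd x h1) with h2 | h2
          · exact Or.inr ⟨h1, h2⟩
          · exact Or.inl h2.symm

-- ===== VERDICT (by name: the statement is the Claim_ definition above) =====
theorem get_distinct_days_spec : Claim_equal_get_distinct_days := by
  intro bars _
  unfold Spec_get_distinct_days get_distinct_days get_distinct_days_alt
  simp only []
  rw [pvKeysA, pvDaysB, List.nil_append, pvScanFoldl, List.nil_append, PySem.Dict.keys_empty, pvUpdate_nil]
  have hs : (PySem.List.sorted (pvDays bars) (fun d => d)).Pairwise (· ≤ ·) := by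
    simpa using PySem.List.sorted_pairwise (pvDays bars) (fun d => d)
  obtain ⟨pw, hmem⟩ := pvScan_none _ hs
  refine PySem.List.sorted_eq_of_perm_of_pairwise_lt _ _ _ ?_ ?_
  · rw [List.perm_ext_iff_of_nodup (pw.imp fun h => ne_of_lt h) (PySem.Set.nodup_ofList _)]
    intro x
    rw [hmem x, PySem.List.mem_sorted, PySem.Set.mem_ofList]
  · simpa using pw
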